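-- pv_equiv track=rewrite | github.com/andirs/rs2018 | src/rnn.py | calc_steps_per_epoch
-- ===== SOURCE A (Python) =====
-- def calc_steps_per_epoch(data, seq_len, step):
--     count = 0
--     for d in data:
--         max_len = len(d)
--         i = 0
--         while i + seq_len < max_len:
--             count += 1
--             i += step
--     return count
-- ===== SOURCE B (Python) =====
-- def calc_steps_per_epoch(data, seq_len, step):
--     # Closed form per sequence: number of i in {0, step, 2*step, ...} with
--     # i + seq_len < len(d) is ceil((len(d) - seq_len) / step) when positive.
--     total = 0
--     for d in data:
--         r = len(d) - seq_len
--         if r > 0: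
--             total += (r + step - 1) // step
--     return total
-- ===== Notes on version B (the rewrite author's own statement) =====
-- stated objective: alternative
-- what changed: Replaces the inner while-loop stepping an index through each sequence by a closed-form ceiling-division formula per sequence.
import Mathlib
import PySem

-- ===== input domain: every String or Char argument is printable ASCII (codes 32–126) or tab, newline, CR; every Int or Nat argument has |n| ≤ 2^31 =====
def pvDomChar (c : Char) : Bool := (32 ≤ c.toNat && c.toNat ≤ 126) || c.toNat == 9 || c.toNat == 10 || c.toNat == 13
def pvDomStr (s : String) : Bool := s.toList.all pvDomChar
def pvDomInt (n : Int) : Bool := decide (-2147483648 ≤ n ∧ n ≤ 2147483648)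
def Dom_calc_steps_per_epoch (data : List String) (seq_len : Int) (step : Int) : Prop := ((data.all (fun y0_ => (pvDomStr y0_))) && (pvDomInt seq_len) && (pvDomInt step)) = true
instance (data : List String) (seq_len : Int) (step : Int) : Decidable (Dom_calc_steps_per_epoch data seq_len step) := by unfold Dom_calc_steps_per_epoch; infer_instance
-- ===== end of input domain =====

-- B replaces A's inner while-loop by a closed-form ceiling-division formula per sequence.

-- ===== PORT A =====
-- A's inner 'while i + seq_len < max_len: count += 1; i += step' as fuel recursion;
-- fuel (max_len - seq_len).toNat suffices whenever the loop terminates (step >= 1,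
-- or the condition is false at entry), which is exactly Pre_.
def pvWhileA (fuel : Nat) (i count seq_len step max_len : Int) : Int :=
  match fuel with
  | 0 => count
  | fuel + 1 =>
    if i + seq_len < max_len then pvWhileA fuel (i + step) (count + 1) seq_len step max_len
    else count

def calc_steps_per_epoch (data : List String) (seq_len : Int) (step : Int) : Int :=
  data.foldl (fun count d =>
    let max_len : Int := PySem.Str.len d
    pvWhileA (max_len - seq_len).toNat 0 count seq_len step max_len) 0

-- ===== PORT B =====
def calc_steps_per_epoch_alt (data : List String) (seq_len : Int) (step : Int) : Int :=
  data.foldl (fun total d =>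
    let r : Int := PySem.Str.len d - seq_len
    if r > 0 then total + PySem.Int.floordiv (r + step - 1) step else total) 0

-- ===== PRECONDITION & SPEC =====
-- Pre_ excludes exactly the inputs on which A's while-loop never terminates:
-- step <= 0 together with some sequence longer than seq_len.
def Pre_calc_steps_per_epoch (data : List String) (seq_len : Int) (step : Int) : Prop :=
  0 < step ∨ ∀ d ∈ data, (PySem.Str.len d : Int) ≤ seq_len
instance (data : List String) (seq_len : Int) (step : Int) : Decidable (Pre_calc_steps_per_epoch data seq_len step) := by unfold Pre_calc_steps_per_epoch; infer_instance

def pvWitness_calc_steps_per_epoch : List String × Int × Int := (["abcde", "xy"], 2, 2)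

def Spec_calc_steps_per_epoch (data : List String) (seq_len : Int) (step : Int) (out : Int) : Prop := out = calc_steps_per_epoch_alt data seq_len step
instance (data : List String) (seq_len : Int) (step : Int) (out : Int) : Decidable (Spec_calc_steps_per_epoch data seq_len step out) := by unfold Spec_calc_steps_per_epoch; infer_instance

-- ===== CLAIM (what is proved, stated in full; the proofs are below) =====
def Claim_equal_calc_steps_per_epoch : Prop := ∀ (data : List String) (seq_len : Int) (step : Int), Dom_calc_steps_per_epoch data seq_len step → Pre_calc_steps_per_epoch data seq_len step → Spec_calc_steps_per_epoch data seq_len step (calc_steps_per_epoch data seq_len step)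

-- ===== LEMMAS AND PROOFS =====

-- Closed form of one inner while-loop run, step > 0.
theorem pvWhileA_closed (step : Int) (hst : 0 < step) :
    ∀ (fuel : Nat) (i count seq_len max_len : Int),
      (max_len - seq_len - i).toNat ≤ fuel →
      pvWhileA fuel i count seq_len step max_len =
        count + (if max_len - seq_len - i > 0
                 then PySem.Int.floordiv (max_len - seq_len - i + step - 1) step else 0) := by
  intro fuel
  induction fuel with
  | zero =>
    intro i count seq_len max_len hf
    have : ¬ (max_len - seq_len - i > 0) := by omega
    rw [pvWhileA, if_neg this]; ring
  | succ n ih =>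
    intro i count seq_len max_len hf
    by_cases hc : i + seq_len < max_len
    · have hr : max_len - seq_len - i > 0 := by omega
      rw [pvWhileA, if_pos hc, ih (i + step) (count + 1) seq_len max_len (by omega)]
      by_cases hr2 : max_len - seq_len - (i + step) > 0
      · rw [if_pos hr2, if_pos hr]
        have h1 : PySem.Int.floordiv (max_len - seq_len - i + step - 1) step
            = PySem.Int.floordiv (max_len - seq_len - (i + step) + step - 1) step + 1 := by
          rw [PySem.Int.floordiv_eq_ediv_of_pos hst, PySem.Int.floordiv_eq_ediv_of_pos hst]
          have : max_len - seq_len - i + step - 1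
              = (max_len - seq_len - (i + step) + step - 1) + 1 * step := by ring
          rw [this, Int.add_mul_ediv_right _ _ (by omega : step ≠ 0)]
        omega
      · rw [if_neg hr2, if_pos hr]
        have h1 : PySem.Int.floordiv (max_len - seq_len - i + step - 1) step = 1 := by
          rw [PySem.Int.floordiv_eq_iff_of_pos hst]
          constructor <;> nlinarith
        omega
    · have hr : ¬ (max_len - seq_len - i > 0) := by omega
      rw [pvWhileA, if_neg hc, if_neg hr]; ring

-- When the loop condition is false at entry (string no longer than seq_len),
-- one inner run leaves count unchanged for any fuel.
theorem pvWhileA_noop (fuel : Nat) (count seq_len step max_len : Int)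
    (h : max_len ≤ seq_len) : pvWhileA fuel 0 count seq_len step max_len = count := by
  cases fuel with
  | zero => rfl
  | succ n =>
    rw [pvWhileA, if_neg (by omega)]

-- ===== VERDICT (by name: the statement is the Claim_ definition above) =====
theorem calc_steps_per_epoch_spec : Claim_equal_calc_steps_per_epoch := by
  intro data seq_len step hdom hpre
  unfold Spec_calc_steps_per_epoch calc_steps_per_epoch calc_steps_per_epoch_alt
  rcases hpre with hst | hshort
  · -- step > 0: the two per-element updaters agree pointwise
    congr 1
    funext count d
    show pvWhileA (PySem.Str.len d - seq_len).toNat 0 count seq_len step (PySem.Str.len d)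
        = if PySem.Str.len d - seq_len > 0
          then count + PySem.Int.floordiv (PySem.Str.len d - seq_len + step - 1) step
          else count
    have h := pvWhileA_closed step hst (PySem.Str.len d - seq_len).toNat 0 count seq_len
      (PySem.Str.len d) (by omega)
    simp only [sub_zero] at h
    rw [h]
    by_cases hr : PySem.Str.len d - seq_len > 0
    · rw [if_pos hr, if_pos hr]
    · rw [if_neg hr, if_neg hr]; ring
  · -- every sequence is short: both sides keep the accumulator unchanged
    clear hdom
    induction data with
    | nil => rfl
    | cons d ds ih =>
      simp only [List.foldl_cons]
      rw [pvWhileA_noop _ _ _ _ _ (hshort d (by simp)),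
          if_neg (by have := hshort d (by simp); omega)]
      exact ih (fun x hx => hshort x (List.mem_cons_of_mem _ hx))
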